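-- pv_equiv track=rewrite | github.com/teamprosperlink/Singletap-backend | canonicalization/canonicalizer.py | _build_concept_path
-- ===== SOURCE A (Python) =====
-- from typing import Dict, List, Optional
--
-- def _build_concept_path(
--     concept_id: str,
--     attribute_key: Optional[str],
--     hypernyms: List[str],
-- ) -> List[str]:
--     """
--     Build concept_path: [attribute_key, ...hypernyms, concept_id].
--
--     Example:
--         attribute_key="vehicle_type", hypernyms=["motor vehicle"], concept_id="car"
--         -> ["vehicle_type", "motor vehicle", "car"]
--     """
--     path = []
--
--     if attribute_key:
--         path.append(attribute_key.lower())
--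
--     if hypernyms:
--         # Add hypernyms (most general first, most specific last)
--         # Reverse if they come leaf-to-root (but our sources give parent labels directly)
--         for h in hypernyms:
--             hl = h.lower()
--             if hl not in path and hl != concept_id:
--                 path.append(hl)
--
--     if concept_id not in path:
--         path.append(concept_id)
--
--     return path
-- ===== SOURCE B (Python) =====
-- def _build_concept_path(concept_id, attribute_key, hypernyms):
--     # Recursive dedup: take the head, drop every later occurrence, recurse on the rest.
--     def uniq(xs):
--         if not xs:
--             return []
--         head = xs[0]
--         return [head] + uniq([x for x in xs[1:] if x != head])
--
--     key_part = [attribute_key.lower()] if attribute_key else []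
--     lowered = [h.lower() for h in (hypernyms or []) if h.lower() != concept_id]
--     return uniq(key_part + lowered + [concept_id])
-- ===== Notes on version B (the rewrite author's own statement) =====
-- stated objective: alternative
-- what changed: B assembles the full candidate list (lowered key, filtered lowered hypernyms, concept_id) and deduplicates it by structural recursion that keeps the head and deletes all its later occurrences before recursing, instead of A's single forward loop that tests membership in the path built so far.
import Mathlib
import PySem

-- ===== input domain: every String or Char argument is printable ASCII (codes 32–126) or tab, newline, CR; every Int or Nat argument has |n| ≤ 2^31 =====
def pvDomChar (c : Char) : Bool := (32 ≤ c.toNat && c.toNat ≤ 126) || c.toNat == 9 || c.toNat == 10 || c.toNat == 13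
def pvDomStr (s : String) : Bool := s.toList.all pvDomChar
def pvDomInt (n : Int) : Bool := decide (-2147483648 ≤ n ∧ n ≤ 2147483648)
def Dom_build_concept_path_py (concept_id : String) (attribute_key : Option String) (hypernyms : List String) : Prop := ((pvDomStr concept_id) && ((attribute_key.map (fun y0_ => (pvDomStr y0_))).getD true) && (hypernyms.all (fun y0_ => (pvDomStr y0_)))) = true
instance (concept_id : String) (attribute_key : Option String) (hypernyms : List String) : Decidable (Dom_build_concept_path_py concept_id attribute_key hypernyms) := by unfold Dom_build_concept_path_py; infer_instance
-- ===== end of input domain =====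

-- B assembles the whole candidate list and dedupes it by a head-keep / delete-later-occurrences
-- recursion instead of A's forward loop with membership tests against the path built so far; objective: alternative.

-- ===== PORT A =====
def build_concept_path_py (concept_id : String) (attribute_key : Option String) (hypernyms : List String) : List String :=
  let path : List String := []
  let path := match attribute_key with          -- `if attribute_key:` — None and "" are falsy
    | some k => if k ≠ "" then path ++ [PySem.Str.lower k] else path
    | none => path
  let path := if hypernyms ≠ [] then            -- `if hypernyms:`
      hypernyms.foldl (fun p h =>
        let hl := PySem.Str.lower h
        if ¬ p.contains hl ∧ hl ≠ concept_id then p ++ [hl] else p) path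
    else path
  if ¬ path.contains concept_id then path ++ [concept_id] else path

-- ===== PORT B =====
-- uniq(xs): keep the head, delete every later occurrence of it, recurse on what remains
def pvUniqRec : List String → List String
  | [] => []
  | x :: rest => x :: pvUniqRec (rest.filter (fun y => y != x))
termination_by xs => xs.length
decreasing_by
  simpa using Nat.lt_succ_of_le (List.length_filter_le _ rest)

def build_concept_path_py_alt (concept_id : String) (attribute_key : Option String) (hypernyms : List String) : List String :=
  let key_part : List String := match attribute_key with   -- `[attribute_key.lower()] if attribute_key else []`
    | some k => if k ≠ "" then [PySem.Str.lower k] else []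
    | none => []
  let lowered := hypernyms.filterMap (fun h =>             -- the comprehension over `hypernyms or []`
      let hl := PySem.Str.lower h
      if hl ≠ concept_id then some hl else none)
  pvUniqRec (key_part ++ lowered ++ [concept_id])

-- ===== PRECONDITION & SPEC =====
def Spec_build_concept_path_py (concept_id : String) (attribute_key : Option String) (hypernyms : List String) (out : List String) : Prop := out = build_concept_path_py_alt concept_id attribute_key hypernyms
instance (concept_id : String) (attribute_key : Option String) (hypernyms : List String) (out : List String) : Decidable (Spec_build_concept_path_py concept_id attribute_key hypernyms out) := by unfold Spec_build_concept_path_py; infer_instance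

-- ===== CLAIM =====
def Claim_equal_build_concept_path_py : Prop := ∀ (concept_id : String) (attribute_key : Option String) (hypernyms : List String), Dom_build_concept_path_py concept_id attribute_key hypernyms → Spec_build_concept_path_py concept_id attribute_key hypernyms (build_concept_path_py concept_id attribute_key hypernyms)

-- ===== LEMMAS AND PROOFS =====

-- A's hypernym loop is the dedup fold (PySem.Set.add) over the pre-filtered lowered hypernyms.
lemma hyp_fold_eq (concept_id : String) (hyp : List String) (p : List String) :
    hyp.foldl (fun p h =>
        let hl := PySem.Str.lower h
        if ¬ p.contains hl ∧ hl ≠ concept_id then p ++ [hl] else p) p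
    = (hyp.filterMap (fun h =>
        let hl := PySem.Str.lower h
        if hl ≠ concept_id then some hl else none)).foldl PySem.Set.add p := by
  induction hyp generalizing p with
  | nil => rfl
  | cons h t ih =>
    simp only [ne_eq] at ih
    simp only [List.foldl_cons, List.filterMap_cons, ne_eq]
    by_cases hc : PySem.Str.lower h = concept_id
    · simp only [hc, not_true_eq_false, and_false, if_false]
      exact ih p
    · by_cases hm : p.contains (PySem.Str.lower h) = true
      · simp only [hc, not_false_eq_true, and_true, not_true_eq_false, if_false,
          List.foldl_cons, PySem.Set.add, PySem.Set.contains, hm, if_true]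
        exact ih p
      · simp only [hc, not_false_eq_true, and_true, if_true,
          List.foldl_cons, PySem.Set.add, PySem.Set.contains, hm]
        exact ih (p ++ [PySem.Str.lower h])

-- A's final conditional append of concept_id is one more dedup-fold step.
lemma tail_step (concept_id : String) (p : List String) :
    (if ¬ p.contains concept_id then p ++ [concept_id] else p)
    = List.foldl PySem.Set.add p [concept_id] := by
  simp only [List.foldl_cons, List.foldl_nil, PySem.Set.add, PySem.Set.contains]
  by_cases hc : p.contains concept_id = true <;> simp_all

-- The seen-set fold from any prefix p equals p followed by B's head/delete recursion
-- applied to the elements not already in p.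
lemma foldl_add_eq_uniqRec (xs : List String) (p : List String) :
    List.foldl PySem.Set.add p xs
    = p ++ pvUniqRec (xs.filter (fun y => !(p.contains y))) := by
  induction hn : xs.length using Nat.strong_induction_on generalizing xs p with
  | _ n ih =>
    cases xs with
    | nil => simp [pvUniqRec]
    | cons x t =>
      subst hn
      simp only [List.foldl_cons, List.filter_cons, PySem.Set.add, PySem.Set.contains]
      by_cases hm : p.contains x = true
      · simp only [hm, Bool.not_true, Bool.false_eq_true, if_false, if_true]
        exact ih t.length (by simp) t p rfl
      · simp only [hm, Bool.not_false, Bool.false_eq_true, if_false, if_true, pvUniqRec,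
          List.filter_filter]
        rw [ih t.length (by simp) t (p ++ [x]) rfl]
        have hpred : ∀ y : String,
            (!( (p ++ [x]).contains y)) = ((y != x) && !(p.contains y)) := by
          intro y
          by_cases hyx : y = x
          · subst hyx; simp
          · have : (x == y) = false := by
              simp; exact fun h => hyx h.symm
            simp [bne, hyx]
        simp only [List.append_assoc, List.singleton_append]
        congr 2
        exact congrArg pvUniqRec (List.filter_congr (fun y _ => hpred y))

-- Starting from the empty path, the fold is exactly B's recursion on the whole list.
lemma foldl_add_nil_eq_uniqRec (xs : List String) :
    List.foldl PySem.Set.add [] xs = pvUniqRec xs := by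
  have := foldl_add_eq_uniqRec xs []
  simpa [PySem.Set.contains] using this

-- ===== VERDICT =====
theorem build_concept_path_py_spec : Claim_equal_build_concept_path_py := by
  intro concept_id attribute_key hypernyms _
  unfold Spec_build_concept_path_py build_concept_path_py build_concept_path_py_alt
  have hbody : ∀ init : List String,
      List.foldl PySem.Set.add [] init = init →
      (if ¬ (if hypernyms ≠ [] then
          hypernyms.foldl (fun p h =>
            let hl := PySem.Str.lower h
            if ¬ p.contains hl ∧ hl ≠ concept_id then p ++ [hl] else p) init
        else init).contains concept_id then
          (if hypernyms ≠ [] then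
            hypernyms.foldl (fun p h =>
              let hl := PySem.Str.lower h
              if ¬ p.contains hl ∧ hl ≠ concept_id then p ++ [hl] else p) init
          else init) ++ [concept_id]
        else (if hypernyms ≠ [] then
            hypernyms.foldl (fun p h =>
              let hl := PySem.Str.lower h
              if ¬ p.contains hl ∧ hl ≠ concept_id then p ++ [hl] else p) init
          else init))
      = pvUniqRec (init ++ (hypernyms.filterMap (fun h =>
              let hl := PySem.Str.lower h
              if hl ≠ concept_id then some hl else none)) ++ [concept_id]) := by
    intro init h0
    rw [← foldl_add_nil_eq_uniqRec, List.append_assoc, List.foldl_append,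
        List.foldl_append, h0, ← hyp_fold_eq, ← tail_step]
    by_cases he : hypernyms = []
    · subst he; simp
    · simp [he]
  rcases attribute_key with _ | k
  · exact hbody [] rfl
  · by_cases hk : k = ""
    · subst hk; simpa using hbody [] rfl
    · simpa [hk] using hbody [PySem.Str.lower k] rfl
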